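-- pv_equiv track=rewrite | github.com/lianghai/mongolian | font-tooling/scripting/utils.py | slice_joining_form
-- ===== SOURCE A (Python) =====
-- def slice_joining_form(joining_form: str, slice_into: int) -> list[str]:
--     name_to_joinedness = {
--         "isol": (False, False),
--         "init": (False, True),
--         "medi": (True, True),
--         "fina": (True, False),
--     }
--     joinedness_to_name = {v: k for k, v in name_to_joinedness.items()}
--     is_joined_before, is_joined_after = name_to_joinedness[joining_form]
--     joining_forms = []
--     if slice_into == 1:
--         joining_forms.append(joining_form)
--     elif slice_into > 1:
--         for i in range(slice_into):
--             if i == 0: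
--                 joining_forms.append(joinedness_to_name[(is_joined_before, True)])
--             elif i == slice_into - 1:
--                 joining_forms.append(joinedness_to_name[(True, is_joined_after)])
--             else:
--                 joining_forms.append(joinedness_to_name[(True, True)])
--     return joining_forms
-- ===== SOURCE B (Python) =====
-- SPLIT2 = {
--     "isol": ("init", "fina"),
--     "init": ("init", "medi"),
--     "medi": ("medi", "medi"),
--     "fina": ("medi", "fina"),
-- }
--
--
-- def slice_joining_form(joining_form: str, slice_into: int) -> list[str]:
--     # Peel one subform at a time: split the remaining form into (left, rest),
--     # emit left, carry rest; finally emit the remaining form.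
--     if joining_form not in SPLIT2:
--         raise KeyError(joining_form)
--     forms = []
--     form = joining_form
--     for _ in range(slice_into - 1):
--         left, form = SPLIT2[form]
--         forms.append(left)
--     if slice_into >= 1:
--         forms.append(form)
--     return forms
-- ===== Notes on version B (the rewrite author's own statement) =====
-- stated objective: alternative
-- what changed: Replaces A's index-branching loop over range(slice_into) with joinedness flags and dict lookups by a rewriting automaton: a split-into-two table repeatedly splits the remaining form into an emitted left piece and a carried remainder.
import Mathlib
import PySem

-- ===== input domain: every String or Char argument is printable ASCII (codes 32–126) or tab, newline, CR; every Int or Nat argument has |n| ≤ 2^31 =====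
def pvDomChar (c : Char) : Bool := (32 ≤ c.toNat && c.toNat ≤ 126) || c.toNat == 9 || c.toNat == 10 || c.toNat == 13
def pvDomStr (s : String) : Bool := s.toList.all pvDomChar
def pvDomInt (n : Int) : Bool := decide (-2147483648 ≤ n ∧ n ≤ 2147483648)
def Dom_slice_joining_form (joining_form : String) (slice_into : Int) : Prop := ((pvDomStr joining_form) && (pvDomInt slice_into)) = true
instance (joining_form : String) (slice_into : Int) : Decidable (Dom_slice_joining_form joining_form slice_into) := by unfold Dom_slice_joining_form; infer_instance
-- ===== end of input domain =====

-- B replaces A's index-branching loop with joinedness flags by a rewriting automaton that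
-- repeatedly splits the remaining form into an emitted left piece and a carried remainder (objective: alternative).

-- ===== PORT A =====
def pvNameToJoinedness : PySem.Dict String (Bool × Bool) :=
  PySem.Dict.ofList [("isol", (false, false)), ("init", (false, true)),
                     ("medi", (true, true)), ("fina", (true, false))]

def pvJoinednessToName : PySem.Dict (Bool × Bool) String :=
  PySem.Dict.ofList (pvNameToJoinedness.items.map (fun kv => (kv.2, kv.1)))

-- name_to_joinedness[joining_form] raises KeyError when the key is absent (get? = none); Pre_ excludes that.
def slice_joining_form (joining_form : String) (slice_into : Int) : List String :=
  let jb := (pvNameToJoinedness.get? joining_form).getD (false, false)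
  let is_joined_before := jb.1
  let is_joined_after := jb.2
  if slice_into == 1 then [joining_form]
  else if slice_into > 1 then
    (PySem.List.pyRange 0 slice_into 1).foldl (fun acc i =>
      if i == 0 then acc ++ [(pvJoinednessToName.get? (is_joined_before, true)).getD ""]
      else if i == slice_into - 1 then acc ++ [(pvJoinednessToName.get? (true, is_joined_after)).getD ""]
      else acc ++ [(pvJoinednessToName.get? (true, true)).getD ""]) []
  else []

-- ===== PORT B =====
def pvSplit2 : PySem.Dict String (String × String) :=
  PySem.Dict.ofList [("isol", ("init", "fina")), ("init", ("init", "medi")),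
                     ("medi", ("medi", "medi")), ("fina", ("medi", "fina"))]

-- the KeyError raised on a form absent from SPLIT2 returns [] here; Pre_ excludes those inputs
def slice_joining_form_alt (joining_form : String) (slice_into : Int) : List String :=
  if (pvSplit2.get? joining_form).isNone then [] else
  let st := (List.range (slice_into - 1).toNat).foldl
    (fun (st : List String × String) _ =>
      let lr := (pvSplit2.get? st.2).getD ("", "")
      (st.1 ++ [lr.1], lr.2)) ([], joining_form)
  if 1 ≤ slice_into then st.1 ++ [st.2] else st.1

-- ===== PRECONDITION & SPEC =====
-- Pre_ excludes exactly the joining forms absent from name_to_joinedness, on which A raises KeyError.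
def Pre_slice_joining_form (joining_form : String) (slice_into : Int) : Prop :=
  joining_form = "isol" ∨ joining_form = "init" ∨ joining_form = "medi" ∨ joining_form = "fina"
instance (joining_form : String) (slice_into : Int) : Decidable (Pre_slice_joining_form joining_form slice_into) := by
  unfold Pre_slice_joining_form; infer_instance

def pvWitness_slice_joining_form : String × Int := ("medi", 3)

def Spec_slice_joining_form (joining_form : String) (slice_into : Int) (out : List String) : Prop :=
  out = slice_joining_form_alt joining_form slice_into
instance (joining_form : String) (slice_into : Int) (out : List String) : Decidable (Spec_slice_joining_form joining_form slice_into out) := by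
  unfold Spec_slice_joining_form; infer_instance

-- ===== CLAIM (what is proved, stated in full; the proofs are below) =====
def Claim_equal_slice_joining_form : Prop := ∀ (joining_form : String) (slice_into : Int), Dom_slice_joining_form joining_form slice_into → Pre_slice_joining_form joining_form slice_into → Spec_slice_joining_form joining_form slice_into (slice_joining_form joining_form slice_into)

-- ===== LEMMAS AND PROOFS =====

-- B's loop body as a named step function (acc, remaining form) ↦ (acc ++ [left], right).
def pvStep (st : List String × String) : List String × String :=
  let lr := (pvSplit2.get? st.2).getD ("", "")
  (st.1 ++ [lr.1], lr.2)

-- a foldl whose body ignores the list element is an iterate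
theorem pvFoldIgnore {α β : Type} (f : α → α) (l : List β) (init : α) :
    l.foldl (fun s _ => f s) init = f^[l.length] init := by
  induction l generalizing init with
  | nil => rfl
  | cons x xs ih => simpa [Function.iterate_succ_apply] using ih (f init)

-- once the remaining form is "medi" or "fina" it is stable: each step emits "medi" and keeps it
theorem pvStab (m : Nat) (acc : List String) (f : String)
    (hf : f = "medi" ∨ f = "fina") :
    pvStep^[m] (acc, f) = (acc ++ List.replicate m "medi", f) := by
  induction m generalizing acc with
  | zero => simp
  | succ k ih =>
    rw [Function.iterate_succ_apply]
    have hstep : pvStep (acc, f) = (acc ++ ["medi"], f) := by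
      rcases hf with rfl | rfl <;> rfl
    rw [hstep, ih]
    simp [List.replicate_succ]

-- A's loop for slice_into ≥ 2, as first element / last element / middle fill.
theorem pvLoop (n : Int) (hn : 2 ≤ n) (x y z : String) :
    (PySem.List.pyRange 0 n 1).foldl (fun acc i =>
      if i == 0 then acc ++ [x] else if i == n - 1 then acc ++ [y] else acc ++ [z]) []
    = x :: (List.replicate (n.toNat - 2) z ++ [y]) := by
  have hcongr : (PySem.List.pyRange 0 n 1).foldl (fun acc i =>
      if i == 0 then acc ++ [x] else if i == n - 1 then acc ++ [y] else acc ++ [z]) []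
      = (PySem.List.pyRange 0 n 1).foldl (fun acc i =>
      acc ++ [if i == 0 then x else if i == n - 1 then y else z]) [] := by
    apply PySem.List.foldl_congr_mem
    intro acc i _
    split_ifs <;> rfl
  rw [hcongr, PySem.List.foldl_append_singleton_eq_map]
  have hsplit : PySem.List.pyRange 0 n 1 = 0 :: (PySem.List.pyRange 1 (n - 1) 1 ++ [n - 1]) := by
    rw [PySem.List.pyRange_one_cons (by omega)]
    norm_num
    have h : PySem.List.pyRange 1 n 1 = PySem.List.pyRange 1 (n - 1 + 1) 1 := by norm_num
    rw [h, PySem.List.pyRange_one_succ_right (by omega)]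
  rw [hsplit]
  simp only [List.map_cons, List.map_append, List.map]
  have h0 : (if (0 : Int) == 0 then x else if (0 : Int) == n - 1 then y else z) = x := rfl
  have hl : (if (n - 1 : Int) == 0 then x else if (n - 1 : Int) == n - 1 then y else z) = y := by
    have : ¬ (n - 1 = 0) := by omega
    simp [this]
  rw [h0, hl]
  have hmid : (PySem.List.pyRange 1 (n - 1) 1).map
      (fun i => if i == 0 then x else if i == n - 1 then y else z)
      = List.replicate (n.toNat - 2) z := by
    have hmap : (PySem.List.pyRange 1 (n - 1) 1).map
        (fun i => if i == 0 then x else if i == n - 1 then y else z)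
        = (PySem.List.pyRange 1 (n - 1) 1).map (fun _ => z) := by
      apply List.map_congr_left
      intro i hi
      rw [PySem.List.mem_pyRange_one] at hi
      have h1 : ¬ (i = 0) := by omega
      have h2 : ¬ (i = n - 1) := by omega
      simp [h1, h2]
    rw [hmap, List.map_const']
    rw [PySem.List.length_pyRange_one]
    congr 1
    omega
  rw [hmid]
  simp

-- the two ports agree for slice_into ≥ 2, by cases on the admitted joining form
theorem pvCase (jf : String) (hjf : jf = "isol" ∨ jf = "init" ∨ jf = "medi" ∨ jf = "fina")
    (n : Int) (hn : 2 ≤ n) :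
    slice_joining_form jf n = slice_joining_form_alt jf n := by
  have hb1 : (n == 1) = false := by simp; omega
  have hgt : n > 1 := by omega
  have h1n : 1 ≤ n := by omega
  obtain ⟨k, hk⟩ : ∃ k, (n - 1).toNat = k + 1 := ⟨(n - 1).toNat - 1, by omega⟩
  have hk2 : n.toNat - 2 = k := by omega
  unfold slice_joining_form slice_joining_form_alt
  have hfold : ∀ init : List String × String,
      (List.range (n - 1).toNat).foldl
        (fun (st : List String × String) _ =>
          let lr := (pvSplit2.get? st.2).getD ("", "")
          (st.1 ++ [lr.1], lr.2)) init = pvStep^[(n - 1).toNat] init := by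
    intro init
    have := pvFoldIgnore pvStep (List.range (n - 1).toNat) init
    simpa [pvStep] using this
  rcases hjf with rfl | rfl | rfl | rfl <;>
    rw [hfold] <;>
    simp only [hb1, Bool.false_eq_true, if_false, if_pos hgt, if_pos h1n, hk,
      show (pvSplit2.get? "isol").isNone = false from rfl,
      show (pvSplit2.get? "init").isNone = false from rfl,
      show (pvSplit2.get? "medi").isNone = false from rfl,
      show (pvSplit2.get? "fina").isNone = false from rfl,
      Function.iterate_succ_apply] <;>
    rw [pvLoop n hn]
  · rw [show pvStep ([], "isol") = (["init"], "fina") from rfl,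
      pvStab k _ _ (Or.inr rfl), hk2]; simp
    exact ⟨by decide, Or.inr (by decide), by decide⟩
  · rw [show pvStep ([], "init") = (["init"], "medi") from rfl,
      pvStab k _ _ (Or.inl rfl), hk2]; simp
    exact ⟨by decide, Or.inr (by decide), by decide⟩
  · rw [show pvStep ([], "medi") = (["medi"], "medi") from rfl,
      pvStab k _ _ (Or.inl rfl), hk2]; simp
    exact ⟨by decide, Or.inr (by decide), by decide⟩
  · rw [show pvStep ([], "fina") = (["medi"], "fina") from rfl,
      pvStab k _ _ (Or.inr rfl), hk2]; simp
    exact ⟨by decide, Or.inr (by decide), by decide⟩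

-- ===== VERDICT (by name: the statement is the Claim_ definition above) =====
theorem slice_joining_form_spec : Claim_equal_slice_joining_form := by
  intro jf n _ hPre
  unfold Spec_slice_joining_form
  rcases le_or_gt n 0 with hle | hpos
  · unfold slice_joining_form slice_joining_form_alt
    have h1 : ¬ (n = 1) := by omega
    have h2 : ¬ (n > 1) := by omega
    have h3 : ¬ (1 ≤ n) := by omega
    have h4 : (n - 1).toNat = 0 := by omega
    rcases hPre with rfl | rfl | rfl | rfl <;> simp [h1, h2, h3, h4]
  · rcases eq_or_lt_of_le (show (1:Int) ≤ n by omega) with h1 | h2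
    · subst h1
      rcases hPre with rfl | rfl | rfl | rfl <;> decide
    · exact pvCase jf hPre n (by omega)
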